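-- pv_equiv track=rewrite | github.com/4liyevm/Lab | Lab2.py | ardici_seriyani_hesabla
-- ===== SOURCE A (Python) =====
-- def ardici_seriyani_hesabla(a, n):
--     sonuc = []
--     carpim = 1
--     for i in range(1, n+1):
--         carpim *= a
--         if i % 2 == 0:
--             carpim *= -1
--         sonuc.append(carpim)
--     return sonuc
--
-- a = 2
--
-- n = 5
-- ===== SOURCE B (Python) =====
-- def ardici_seriyani_hesabla(a, n):
--     # pass 1: table of successive powers a^1 .. a^n by repeated multiplication
--     powers = []
--     p = 1
--     for _ in range(n):
--         p *= a
--         powers.append(p)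
--     # pass 2: apply the sign pattern (-1)**(i//2) to the table
--     return [x if (i // 2) % 2 == 0 else -x for i, x in enumerate(powers, start=1)]
-- ===== Notes on version B (the rewrite author's own statement) =====
-- stated objective: alternative
-- what changed: A's single fused loop (accumulator that multiplies by a and flips sign inside one pass) is split into two separate passes: first build the plain power table by repeated multiplication, then map the sign pattern (-1)**(i//2) over it via enumerate.
import Mathlib
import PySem

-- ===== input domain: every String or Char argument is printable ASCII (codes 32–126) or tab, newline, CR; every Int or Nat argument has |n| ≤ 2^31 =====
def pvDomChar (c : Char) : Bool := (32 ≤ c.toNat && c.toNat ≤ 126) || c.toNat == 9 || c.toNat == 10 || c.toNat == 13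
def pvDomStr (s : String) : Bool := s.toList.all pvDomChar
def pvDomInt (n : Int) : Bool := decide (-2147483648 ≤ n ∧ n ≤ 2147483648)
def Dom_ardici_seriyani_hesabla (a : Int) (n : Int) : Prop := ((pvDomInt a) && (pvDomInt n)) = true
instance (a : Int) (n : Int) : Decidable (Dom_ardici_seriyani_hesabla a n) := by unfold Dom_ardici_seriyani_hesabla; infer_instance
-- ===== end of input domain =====

-- B splits A's fused sign-and-multiply accumulator loop into two passes: a power
-- table built by repeated multiplication, then a sign-applying map (objective: alternative).

-- ===== PORT A =====
-- loop body of A: carpim *= a; if i % 2 == 0: carpim *= -1; sonuc.append(carpim)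
def pvAstep (a : Int) (s : List Int × Int) (i : Int) : List Int × Int :=
  let c := s.2 * a
  let c' := if PySem.Int.mod i 2 == 0 then c * (-1) else c
  (s.1 ++ [c'], c')

def ardici_seriyani_hesabla (a : Int) (n : Int) : List Int :=
  ((PySem.List.pyRange 1 (n + 1) 1).foldl (pvAstep a) ([], 1)).1

-- ===== PORT B =====
-- pass 1 loop body: p *= a; powers.append(p)
def pvBstep (a : Int) (s : List Int × Int) (_i : Int) : List Int × Int :=
  (s.1 ++ [s.2 * a], s.2 * a)

-- pass 2 comprehension body: x if (i // 2) % 2 == 0 else -x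
def pvSign (p : Int × Int) : Int :=
  if PySem.Int.mod (PySem.Int.floordiv p.1 2) 2 == 0 then p.2 else -p.2

def ardici_seriyani_hesabla_alt (a : Int) (n : Int) : List Int :=
  -- pass 1: powers = fold of pvBstep over range(n); pass 2: map pvSign over enumerate(powers, 1)
  (PySem.List.enumerate (((PySem.List.pyRange 0 n 1).foldl (pvBstep a) ([], 1)).1) 1).map pvSign

-- ===== PRECONDITION & SPEC =====
def Spec_ardici_seriyani_hesabla (a : Int) (n : Int) (out : List Int) : Prop := out = ardici_seriyani_hesabla_alt a n
instance (a : Int) (n : Int) (out : List Int) : Decidable (Spec_ardici_seriyani_hesabla a n out) := by unfold Spec_ardici_seriyani_hesabla; infer_instance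

-- ===== CLAIM (what is proved, stated in full; the proofs are below) =====
def Claim_equal_ardici_seriyani_hesabla : Prop := ∀ (a : Int) (n : Int), Dom_ardici_seriyani_hesabla a n → Spec_ardici_seriyani_hesabla a n (ardici_seriyani_hesabla a n)

-- ===== LEMMAS AND PROOFS =====

-- closed form of the k-th produced value (k ≥ 1): (-1)^(k/2) * a^k
def pvOut (a : Int) (k : Nat) : Int := if (k / 2) % 2 = 0 then a ^ k else -(a ^ k)

theorem pvModTwo (x : Int) : PySem.Int.mod x 2 = x % 2 :=
  PySem.Int.mod_eq_emod_of_pos (by omega)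

theorem pvFdivTwo (x : Int) : PySem.Int.floordiv x 2 = x / 2 :=
  PySem.Int.floordiv_eq_ediv_of_pos (by omega)

theorem pvOut_succ (a : Int) (m : Nat) :
    pvOut a (m + 1) = if (m + 1) % 2 = 0 then (pvOut a m * a) * (-1) else pvOut a m * a := by
  unfold pvOut
  rcases Nat.even_or_odd m with ⟨k, hk⟩ | ⟨k, hk⟩ <;> subst hk
  · have h2 : (k + k + 1) / 2 = k := by omega
    have h3 : (k + k) / 2 = k := by omega
    rw [if_neg (show ¬ (k + k + 1) % 2 = 0 by omega), h2, h3]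
    split_ifs <;> ring
  · rw [if_pos (show (2 * k + 1 + 1) % 2 = 0 by omega)]
    have h2 : (2 * k + 1 + 1) / 2 = k + 1 := by omega
    have h3 : (2 * k + 1) / 2 = k := by omega
    rw [h2, h3]
    by_cases hk : k % 2 = 0
    · rw [if_neg (by omega), if_pos hk]; ring
    · rw [if_pos (by omega), if_neg hk]; ring

theorem pvFoldA (a : Int) (m : Nat) :
    ((List.range m).map (fun k : Nat => (1 : Int) + (k : Int))).foldl (pvAstep a) ([], 1)
      = ((List.range m).map (fun k => pvOut a (k + 1)), pvOut a m) := by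
  induction m with
  | zero => simp [pvOut]
  | succ m ih =>
    rw [List.range_succ, List.map_append, List.foldl_append, ih]
    simp only [List.map_cons, List.map_nil, List.foldl_cons, List.foldl_nil]
    have hmod : PySem.Int.mod ((1 : Int) + m) 2 = (((m + 1) % 2 : Nat) : Int) := by
      rw [pvModTwo]; push_cast; omega
    simp only [pvAstep, hmod]
    rw [List.map_append]
    by_cases h : (m + 1) % 2 = 0
    · rw [h]
      norm_num
      rw [pvOut_succ, if_pos h]
      ring
    · have h1 : (m + 1) % 2 = 1 := by omega
      rw [h1]
      norm_num
      rw [pvOut_succ, if_neg h]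

theorem pvFoldB (a : Int) (m : Nat) :
    ((List.range m).map (fun k : Nat => (0 : Int) + (k : Int))).foldl (pvBstep a) ([], 1)
      = ((List.range m).map (fun k => a ^ (k + 1)), a ^ m) := by
  induction m with
  | zero => simp
  | succ m ih =>
    rw [List.range_succ, List.map_append, List.foldl_append, ih]
    simp only [List.map_cons, List.map_nil, List.foldl_cons, List.foldl_nil, pvBstep]
    rw [List.map_append]
    simp [pow_succ]

theorem pvSign_val (a : Int) (m : Nat) :
    pvSign ((1 : Int) + m, a ^ (m + 1)) = pvOut a (m + 1) := by
  unfold pvSign pvOut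
  have hdiv : PySem.Int.floordiv ((1 : Int) + m) 2 = (((m + 1) / 2 : Nat) : Int) := by
    rw [pvFdivTwo]; push_cast; omega
  have hmod : PySem.Int.mod (((m + 1) / 2 : Nat) : Int) 2 = ((((m + 1) / 2) % 2 : Nat) : Int) := by
    rw [pvModTwo]; push_cast; omega
  rw [hdiv, hmod]
  by_cases h : ((m + 1) / 2) % 2 = 0
  · rw [if_pos h, h]
    norm_num
  · have h1 : ((m + 1) / 2) % 2 = 1 := by omega
    rw [if_neg h, h1]
    norm_num

theorem pvMapSign (a : Int) (m : Nat) :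
    (PySem.List.enumerate ((List.range m).map (fun k => a ^ (k + 1))) 1).map pvSign
      = (List.range m).map (fun k => pvOut a (k + 1)) := by
  induction m with
  | zero => simp [PySem.List.enumerate_nil]
  | succ m ih =>
    rw [List.range_succ, List.map_append, PySem.List.enumerate_append, List.map_append, ih]
    simp only [List.map_cons, List.map_nil, List.length_map, List.length_range,
      PySem.List.enumerate_cons, PySem.List.enumerate_nil]
    rw [List.map_append]
    congr 1
    simp [pvSign_val a m]

-- ===== VERDICT (by name: the statement is the Claim_ definition above) =====
theorem ardici_seriyani_hesabla_spec : Claim_equal_ardici_seriyani_hesabla := by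
  unfold Claim_equal_ardici_seriyani_hesabla
  intro a n _
  unfold Spec_ardici_seriyani_hesabla ardici_seriyani_hesabla ardici_seriyani_hesabla_alt
  rw [PySem.List.pyRange_one 1 (n + 1), PySem.List.pyRange_one 0 n]
  have h1 : (n + 1 - 1 : Int).toNat = n.toNat := by omega
  have h2 : (n - 0 : Int).toNat = n.toNat := by omega
  rw [h1, h2, pvFoldA, pvFoldB, pvMapSign]
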